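-- pv_equiv track=rewrite | github.com/cognettings/vulscanner | skims/skims/utils/cvss.py | set_default_temporal_scores
-- ===== SOURCE A (Python) =====
-- def set_default_temporal_scores(cvss_vector: str | None) -> str | None:
--     if cvss_vector:
--         metrics = cvss_vector.split("/")
--
--         if first_match := next(
--             (met for met in metrics if met.startswith("E:")), None
--         ):
--             metrics[metrics.index(first_match)] = "E:U"
--         else:
--             metrics.append("E:U")
--
--         if not any(met for met in metrics if met.startswith("RL:")):
--             metrics.append("RL:O")
--
--         if not any(met for met in metrics if met.startswith("RC:")):
--             metrics.append("RC:C")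
--
--         return "/".join(metrics)
--     return None
-- ===== SOURCE B (Python) =====
-- def set_default_temporal_scores(cvss_vector):
--     if not cvss_vector:
--         return None
--     metrics = cvss_vector.split("/")
--     has_e = has_rl = has_rc = False
--     for i, met in enumerate(metrics):
--         if not has_e and met.startswith("E:"):
--             metrics[i] = "E:U"
--             has_e = True
--         elif met.startswith("RL:"):
--             has_rl = True
--         elif met.startswith("RC:"):
--             has_rc = True
--     if not has_e:
--         metrics.append("E:U")
--     if not has_rl:
--         metrics.append("RL:O")
--     if not has_rc:
--         metrics.append("RC:C")
--     return "/".join(metrics)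
-- ===== Notes on version B (the rewrite author's own statement) =====
-- stated objective: simpler
-- what changed: Replaces A's three separate scans (next+list.index+set, and two any() passes) with a single pass over the split list that rewrites the first E: metric in place and records presence flags for E:/RL:/RC:, then appends the missing defaults.
import Mathlib
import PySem

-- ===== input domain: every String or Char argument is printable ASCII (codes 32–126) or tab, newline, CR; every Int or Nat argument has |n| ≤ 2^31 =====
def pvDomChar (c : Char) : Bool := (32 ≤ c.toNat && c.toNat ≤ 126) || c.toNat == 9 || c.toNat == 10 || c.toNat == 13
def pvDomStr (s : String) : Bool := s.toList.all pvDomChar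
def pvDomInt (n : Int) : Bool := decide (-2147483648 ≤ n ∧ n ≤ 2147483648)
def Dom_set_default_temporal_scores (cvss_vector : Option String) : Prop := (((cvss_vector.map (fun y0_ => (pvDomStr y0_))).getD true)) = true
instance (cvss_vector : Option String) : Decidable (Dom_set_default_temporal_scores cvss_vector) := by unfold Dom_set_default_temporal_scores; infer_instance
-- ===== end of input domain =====

-- B replaces A's three separate scans (next + list.index + two any() passes) with one
-- pass keeping presence flags; objective: simpler.

-- shared named helpers for the prefix tests met.startswith("E:"/"RL:"/"RC:")
def swE (m : String) : Bool := PySem.Str.startswith m "E:"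
def swRL (m : String) : Bool := PySem.Str.startswith m "RL:"
def swRC (m : String) : Bool := PySem.Str.startswith m "RC:"

-- ===== PORT A =====
def set_default_temporal_scores (cvss_vector : Option String) : Option String :=
  match cvss_vector with
  | none => none
  | some s =>
    if s == "" then none
    else
      let metrics := (PySem.Str.split? s "/").getD []  -- sep "/" ≠ "", so split? is always some
      let metrics :=
        match metrics.find? swE with
        | some first_match =>
          if first_match == "" then metrics ++ ["E:U"]   -- Python walrus truthiness test
          else
            match PySem.List.index? metrics first_match with
            | some i => metrics.set i "E:U"
            | none => metrics   -- unreachable: first_match ∈ metrics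
        | none => metrics ++ ["E:U"]
      let metrics :=
        if metrics.any (fun met => swRL met && !(met == "")) then metrics
        else metrics ++ ["RL:O"]
      let metrics :=
        if metrics.any (fun met => swRC met && !(met == "")) then metrics
        else metrics ++ ["RC:C"]
      some (PySem.Str.join "/" metrics)

-- ===== PORT B =====
-- B's single pass: returns (updated list, has_e, has_rl, has_rc)
def sdtsLoop : List String → Bool → Bool → Bool → (List String × Bool × Bool × Bool)
  | [], e, rl, rc => ([], e, rl, rc)
  | m :: ms, e, rl, rc =>
    if !e && swE m then
      let r := sdtsLoop ms true rl rc
      ("E:U" :: r.1, r.2)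
    else if swRL m then
      let r := sdtsLoop ms e true rc
      (m :: r.1, r.2)
    else if swRC m then
      let r := sdtsLoop ms e rl true
      (m :: r.1, r.2)
    else
      let r := sdtsLoop ms e rl rc
      (m :: r.1, r.2)

def set_default_temporal_scores_alt (cvss_vector : Option String) : Option String :=
  match cvss_vector with
  | none => none
  | some s =>
    if s == "" then none
    else
      let r := sdtsLoop ((PySem.Str.split? s "/").getD []) false false false  -- sep "/" ≠ "", so split? is always some
      let ms := r.1
      let ms := if r.2.1 then ms else ms ++ ["E:U"]
      let ms := if r.2.2.1 then ms else ms ++ ["RL:O"]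
      let ms := if r.2.2.2 then ms else ms ++ ["RC:C"]
      some (PySem.Str.join "/" ms)

-- ===== PRECONDITION & SPEC =====
def Spec_set_default_temporal_scores (cvss_vector : Option String) (out : Option String) : Prop := out = set_default_temporal_scores_alt cvss_vector
instance (cvss_vector : Option String) (out : Option String) : Decidable (Spec_set_default_temporal_scores cvss_vector out) := by unfold Spec_set_default_temporal_scores; infer_instance

-- ===== CLAIM (what is proved, stated in full; the proofs are below) =====
def Claim_equal_set_default_temporal_scores : Prop := ∀ (cvss_vector : Option String), Dom_set_default_temporal_scores cvss_vector → Spec_set_default_temporal_scores cvss_vector (set_default_temporal_scores cvss_vector)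

-- ===== LEMMAS AND PROOFS =====

lemma swE_ne_empty {m : String} (h : swE m = true) : (m == "") = false := by
  simp only [swE, PySem.Str.startswith_eq, PySem.Chars.startswith_iff] at h
  rcases h with ⟨t, ht⟩
  simp only [beq_eq_false_iff_ne, ne_eq]
  intro he; subst he; simp at ht

lemma swRL_ne_empty {m : String} (h : swRL m = true) : (m == "") = false := by
  simp only [swRL, PySem.Str.startswith_eq, PySem.Chars.startswith_iff] at h
  rcases h with ⟨t, ht⟩
  simp only [beq_eq_false_iff_ne, ne_eq]
  intro he; subst he; simp at ht

lemma swRC_ne_empty {m : String} (h : swRC m = true) : (m == "") = false := by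
  simp only [swRC, PySem.Str.startswith_eq, PySem.Chars.startswith_iff] at h
  rcases h with ⟨t, ht⟩
  simp only [beq_eq_false_iff_ne, ne_eq]
  intro he; subst he; simp at ht

lemma swE_not_RL {m : String} (h : swE m = true) : swRL m = false := by
  simp only [swE, PySem.Str.startswith_eq, PySem.Chars.startswith_iff] at h
  rcases h with ⟨t, ht⟩
  simp only [swRL, PySem.Str.startswith_eq, Bool.eq_false_iff, ne_eq, PySem.Chars.startswith_iff]
  intro hpre
  rcases hpre with ⟨u, hu⟩
  rw [← ht, show "E:".toList = ['E', ':'] from by decide,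
      show "RL:".toList = ['R', 'L', ':'] from by decide] at hu
  simp at hu

lemma swE_not_RC {m : String} (h : swE m = true) : swRC m = false := by
  simp only [swE, PySem.Str.startswith_eq, PySem.Chars.startswith_iff] at h
  rcases h with ⟨t, ht⟩
  simp only [swRC, PySem.Str.startswith_eq, Bool.eq_false_iff, ne_eq, PySem.Chars.startswith_iff]
  intro hpre
  rcases hpre with ⟨u, hu⟩
  rw [← ht, show "E:".toList = ['E', ':'] from by decide,
      show "RC:".toList = ['R', 'C', ':'] from by decide] at hu
  simp at hu

lemma swRL_not_RC {m : String} (h : swRL m = true) : swRC m = false := by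
  simp only [swRL, PySem.Str.startswith_eq, PySem.Chars.startswith_iff] at h
  rcases h with ⟨t, ht⟩
  simp only [swRC, PySem.Str.startswith_eq, Bool.eq_false_iff, ne_eq, PySem.Chars.startswith_iff]
  intro hpre
  rcases hpre with ⟨u, hu⟩
  rw [← ht, show "RL:".toList = ['R', 'L', ':'] from by decide,
      show "RC:".toList = ['R', 'C', ':'] from by decide] at hu
  simp at hu

-- replace the first metric starting with "E:" by "E:U", structurally
def repE : List String → List String
  | [] => []
  | m :: ms => if swE m then "E:U" :: ms else m :: repE ms

lemma repE_of_not_any {l : List String} (h : l.any swE = false) : repE l = l := by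
  induction l with
  | nil => rfl
  | cons m ms ih =>
    simp only [List.any_cons, Bool.or_eq_false_iff] at h
    simp [repE, h.1, ih h.2]

-- A's first-E step equals the structural replacement
lemma stepA (l : List String) :
    (match l.find? swE with
     | some first_match =>
       if first_match == "" then l ++ ["E:U"]
       else
         match PySem.List.index? l first_match with
         | some i => l.set i "E:U"
         | none => l
     | none => l ++ ["E:U"])
    = if l.any swE then repE l else l ++ ["E:U"] := by
  induction l with
  | nil => simp
  | cons m ms ih =>
    by_cases hm : swE m = true
    · rw [List.find?_cons_of_pos hm]
      simp only [swE_ne_empty hm, PySem.List.index?_cons_self, Bool.false_eq_true, if_false]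
      simp [List.any_cons, hm, repE]
    · rw [List.find?_cons_of_neg hm]
      cases hfind : ms.find? swE with
      | none =>
        have hany : ms.any swE = false := by
          simp only [List.any_eq_false]
          exact fun x hx => List.find?_eq_none.mp hfind x hx
        simp [List.any_cons, hm, hany]
      | some fm =>
        have hfm : swE fm = true := List.find?_some hfind
        have hmem : fm ∈ ms := List.mem_of_find?_eq_some hfind
        have hne : m ≠ fm := by
          intro he; rw [he] at hm; exact hm hfm
        have hidx : ∃ j, PySem.List.index? ms fm = some j := by
          rw [← Option.isSome_iff_exists, PySem.List.index?_isSome_iff]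
          exact hmem
        rcases hidx with ⟨j, hj⟩
        have hanyms : ms.any swE = true := List.any_eq_true.mpr ⟨fm, hmem, hfm⟩
        simp only [hfind, swE_ne_empty hfm, Bool.false_eq_true, if_false, hj,
          hanyms, if_true] at ih
        simp only [swE_ne_empty hfm, Bool.false_eq_true, if_false,
          PySem.List.index?_cons_of_ne ms hne, hj, Option.map_some]
        rw [List.set_cons_succ]
        simp [List.any_cons, hm, hanyms, repE, ih]

-- any-P survives A's E-step (including Python's truthiness test), for P = swRL / swRC
lemma any_step (P : String → Bool) (hE : ∀ m, swE m = true → P m = false)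
    (hne : ∀ m, P m = true → (m == "") = false) (hU : P "E:U" = false) (l : List String) :
    (if l.any swE then repE l else l ++ ["E:U"]).any (fun m => P m && !(m == "")) = l.any P := by
  have hP : (fun m => P m && !(m == "")) = P := by
    funext m
    cases h : P m with
    | true => simp [hne m h]
    | false => simp
  rw [hP]
  by_cases hA : l.any swE = true
  · rw [if_pos hA]
    clear hA
    induction l with
    | nil => rfl
    | cons m ms ih =>
      by_cases hm : swE m = true
      · simp [repE, hm, hE m hm, hU]
      · simp [repE, hm, ih]
  · rw [if_neg hA, List.any_append]
    simp [hU]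

-- B's loop in closed form
lemma loop_spec (l : List String) : ∀ (e rl rc : Bool),
    sdtsLoop l e rl rc =
      ((if e then l else repE l), e || l.any swE, rl || l.any swRL, rc || l.any swRC) := by
  induction l with
  | nil => intro e rl rc; cases e <;> simp [sdtsLoop, repE]
  | cons m ms ih =>
    intro e rl rc
    by_cases hm : swE m = true
    · cases e with
      | false =>
        simp only [sdtsLoop, hm, Bool.not_false, Bool.true_and, ih]
        simp [repE, hm, swE_not_RL hm, swE_not_RC hm, List.any_cons]
      | true =>
        simp only [sdtsLoop, Bool.not_true, Bool.false_and, Bool.false_eq_true, if_false,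
          swE_not_RL hm, swE_not_RC hm, ih]
        simp [List.any_cons, hm, swE_not_RL hm, swE_not_RC hm]
    · simp only [Bool.not_eq_true] at hm
      by_cases hrl : swRL m = true
      · simp only [sdtsLoop, hm, Bool.and_false, Bool.false_eq_true, if_false, hrl, ih]
        cases e <;> simp [List.any_cons, hm, hrl, swRL_not_RC hrl, repE]
      · simp only [Bool.not_eq_true] at hrl
        by_cases hrc : swRC m = true
        · simp only [sdtsLoop, hm, Bool.and_false, Bool.false_eq_true, if_false, hrl, hrc, ih]
          cases e <;> simp [List.any_cons, hm, hrl, hrc, repE]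
        · simp only [Bool.not_eq_true] at hrc
          simp only [sdtsLoop, hm, Bool.and_false, Bool.false_eq_true, if_false, hrl, hrc, ih]
          cases e <;> simp [List.any_cons, hm, hrl, hrc, repE]

-- the whole list-level pipeline agrees
lemma pipeline_eq (l : List String) :
    (let m1 :=
       match l.find? swE with
       | some first_match =>
         if first_match == "" then l ++ ["E:U"]
         else
           match PySem.List.index? l first_match with
           | some i => l.set i "E:U"
           | none => l
       | none => l ++ ["E:U"]
     let m2 := if m1.any (fun met => swRL met && !(met == "")) then m1 else m1 ++ ["RL:O"]
     if m2.any (fun met => swRC met && !(met == "")) then m2 else m2 ++ ["RC:C"])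
    = (let r := sdtsLoop l false false false
       let ms := r.1
       let ms := if r.2.1 then ms else ms ++ ["E:U"]
       let ms := if r.2.2.1 then ms else ms ++ ["RL:O"]
       if r.2.2.2 then ms else ms ++ ["RC:C"]) := by
  simp only [loop_spec, Bool.false_or, Bool.false_eq_true, if_false]
  rw [stepA]
  have hstep : (if l.any swE then repE l else repE l ++ ["E:U"])
      = (if l.any swE then repE l else l ++ ["E:U"]) := by
    by_cases h : l.any swE = true
    · simp [h]
    · simp only [Bool.not_eq_true] at h
      simp [h, repE_of_not_any h]
  simp only [hstep]
  have hRL := any_step swRL (fun m => swE_not_RL) (fun m => swRL_ne_empty) (by decide) l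
  have hRC := any_step swRC (fun m => swE_not_RC) (fun m => swRC_ne_empty) (by decide) l
  have hRC2 : ((if l.any swE then repE l else l ++ ["E:U"]) ++ ["RL:O"]).any
      (fun met => swRC met && !(met == "")) = l.any swRC := by
    rw [List.any_append, hRC]
    simp [show swRC "RL:O" = false from by decide]
  rw [hRL]
  by_cases hrl : l.any swRL = true
  · rw [if_pos hrl, hRC]
  · rw [if_neg hrl, hRC2]

-- ===== VERDICT (by name: the statement is the Claim_ definition above) =====
theorem set_default_temporal_scores_spec : Claim_equal_set_default_temporal_scores := by
  intro cv _
  unfold Spec_set_default_temporal_scores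
  cases cv with
  | none => rfl
  | some s =>
    simp only [set_default_temporal_scores, set_default_temporal_scores_alt]
    by_cases hs : (s == "") = true
    · simp [hs]
    · simp only [Bool.not_eq_true] at hs
      simp only [hs, Bool.false_eq_true, if_false]
      rw [pipeline_eq ((PySem.Str.split? s "/").getD [])]
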